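-- pv_equiv track=rewrite | github.com/TING-HiuYu/movefile | project_components/pyside6_plugins/manual_grouping.py | _parse_wildcard_pattern
-- ===== SOURCE A (Python) =====
-- from typing import List, Set, Dict, Any, Optional, NamedTuple, TYPE_CHECKING
--
-- def _parse_wildcard_pattern(pattern: str) -> List[str]:
--     """
--     解析通配符模式，返回固定字符部分和通配符部分的列表
--     例如：**_*.md -> ['*', '*', '_', '*', '.md']
--     但由于我们已经去掉了后缀，实际处理的是 **_* -> ['*', '*', '_', '*']
--     """
--     parts = []
--     i = 0
--     current_fixed = ""
--
--     while i < len(pattern):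
--         if pattern[i] == '*':
--             # 先保存之前的固定字符
--             if current_fixed:
--                 parts.append(current_fixed)
--                 current_fixed = ""
--             # 添加通配符
--             parts.append('*')
--             i += 1
--         else:
--             # 收集固定字符
--             current_fixed += pattern[i]
--             i += 1
--
--     # 保存最后的固定字符
--     if current_fixed:
--         parts.append(current_fixed)
--
--     return parts
-- ===== SOURCE B (Python) =====
-- def _parse_wildcard_pattern(pattern: str):
--     segments = pattern.split('*')
--     parts = []
--     last = len(segments) - 1
--     for i, seg in enumerate(segments):
--         if seg:
--             parts.append(seg)
--         if i != last:
--             parts.append('*')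
--     return parts
-- ===== Notes on version B (the rewrite author's own statement) =====
-- stated objective: idiomatic
-- what changed: Replaces the manual index/accumulator character scan by splitting the pattern at the wildcard character and interleaving: non-empty segments are emitted, with a wildcard token between adjacent segments.
import Mathlib
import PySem

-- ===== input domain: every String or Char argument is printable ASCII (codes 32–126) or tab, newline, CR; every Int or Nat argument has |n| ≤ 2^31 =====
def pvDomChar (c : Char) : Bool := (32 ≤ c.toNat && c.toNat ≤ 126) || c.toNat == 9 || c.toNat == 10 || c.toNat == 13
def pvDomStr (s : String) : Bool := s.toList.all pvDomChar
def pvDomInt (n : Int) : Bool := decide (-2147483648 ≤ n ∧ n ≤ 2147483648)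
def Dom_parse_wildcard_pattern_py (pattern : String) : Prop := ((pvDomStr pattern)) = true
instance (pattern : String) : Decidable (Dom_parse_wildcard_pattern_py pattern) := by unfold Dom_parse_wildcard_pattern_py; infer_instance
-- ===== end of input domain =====

-- B replaces A's index/accumulator character scan by splitting at the wildcard and interleaving the segments (idiomatic; same cost).

-- ===== PORT A =====
-- the while loop over `i`, carrying `current_fixed` (here as a list of chars, appended at the right end)
def pvA_loop : List Char → List Char → List String
  | [], cur => if cur ≠ [] then [String.ofList cur] else []
  | c :: rest, cur =>
      if c = '*' then
        (if cur ≠ [] then [String.ofList cur] else []) ++ "*" :: pvA_loop rest []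
      else
        pvA_loop rest (cur ++ [c])

def parse_wildcard_pattern_py (pattern : String) : List String :=
  pvA_loop pattern.toList []

-- ===== PORT B =====
-- the `for i, seg in enumerate(segments)` loop: emit non-empty seg, and '*' after every segment but the last
def pvB_emit : List (List Char) → List String
  | [] => []
  | [seg] => if seg ≠ [] then [String.ofList seg] else []
  | seg :: rest => (if seg ≠ [] then [String.ofList seg] else []) ++ "*" :: pvB_emit rest

def parse_wildcard_pattern_py_alt (pattern : String) : List String :=
  pvB_emit (PySem.Chars.splitOn pattern.toList "*".toList)

-- ===== PRECONDITION & SPEC =====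
def Spec_parse_wildcard_pattern_py (pattern : String) (out : List String) : Prop := out = parse_wildcard_pattern_py_alt pattern
instance (pattern : String) (out : List String) : Decidable (Spec_parse_wildcard_pattern_py pattern out) := by unfold Spec_parse_wildcard_pattern_py; infer_instance

-- ===== CLAIM (what is proved, stated in full; the proofs are below) =====
def Claim_equal_parse_wildcard_pattern_py : Prop := ∀ (pattern : String), Dom_parse_wildcard_pattern_py pattern → Spec_parse_wildcard_pattern_py pattern (parse_wildcard_pattern_py pattern)

-- ===== LEMMAS AND PROOFS =====

-- the result of splitting on the single character '*', as a clean structural recursion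
def pvSplit1 : List Char → List (List Char)
  | [] => [[]]
  | c :: r =>
      if c = '*' then [] :: pvSplit1 r
      else
        match pvSplit1 r with
        | [] => [[c]]
        | h :: t => (c :: h) :: t

theorem pvSplit1_ne_nil (l : List Char) : pvSplit1 l ≠ [] := by
  induction l with
  | nil => simp [pvSplit1]
  | cons c r ih =>
    simp only [pvSplit1]
    split
    · simp
    · cases h : pvSplit1 r <;> simp

theorem pvGo_eq : ∀ (fuel : Nat) (l cur : List Char) (acc : List (List Char)),
    l.length < fuel →
    PySem.Chars.splitOn.go ['*'] fuel l cur acc =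
      acc.reverse ++ (cur.reverse ++ (pvSplit1 l).headI) :: (pvSplit1 l).tail := by
  intro fuel
  induction fuel with
  | zero => intro l cur acc h; omega
  | succ n ih =>
    intro l cur acc h
    cases l with
    | nil => simp [PySem.Chars.splitOn.go, pvSplit1]
    | cons c rest =>
      by_cases hc : c = '*'
      · subst hc
        rw [PySem.Chars.splitOn.go]
        simp only [List.isPrefixOf, List.length_cons] at *
        rw [if_pos (by simp)]
        rw [ih _ _ _ (by simpa using Nat.lt_of_succ_lt_succ h)]
        cases hsp : pvSplit1 rest with
        | nil => exact absurd hsp (pvSplit1_ne_nil rest)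
        | cons h0 t0 => simp [pvSplit1, hsp]
      · rw [PySem.Chars.splitOn.go]
        rw [if_neg (by simp [List.isPrefixOf]; exact fun e => hc e.symm)]
        rw [ih _ _ _ (by simpa using Nat.lt_of_succ_lt_succ h)]
        cases hsp : pvSplit1 rest with
        | nil => exact absurd hsp (pvSplit1_ne_nil rest)
        | cons h0 t0 => simp [pvSplit1, hc, hsp]

theorem splitOn_star_eq (cs : List Char) :
    PySem.Chars.splitOn cs ['*'] = pvSplit1 cs := by
  rw [PySem.Chars.splitOn, pvGo_eq (cs.length + 1) cs [] [] (by omega)]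
  cases hsp : pvSplit1 cs with
  | nil => exact absurd hsp (pvSplit1_ne_nil cs)
  | cons h0 t0 => simp

theorem pvA_loop_eq (cs : List Char) : ∀ cur : List Char,
    pvA_loop cs cur = pvB_emit ((cur ++ (pvSplit1 cs).headI) :: (pvSplit1 cs).tail) := by
  induction cs with
  | nil => intro cur; simp [pvA_loop, pvSplit1, pvB_emit]
  | cons c r ih =>
    intro cur
    by_cases hc : c = '*'
    · subst hc
      simp only [pvA_loop, pvSplit1]
      have hne := pvSplit1_ne_nil r
      have := ih []
      rw [this]
      cases h : pvSplit1 r with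
      | nil => exact absurd h hne
      | cons h0 t0 =>
        cases t0 <;> simp [pvB_emit, List.headI, List.tail]
    · simp only [pvA_loop, pvSplit1, if_neg hc]
      rw [ih (cur ++ [c])]
      cases h : pvSplit1 r with
      | nil => exact absurd h (pvSplit1_ne_nil r)
      | cons h0 t0 => simp [List.headI, List.tail]

-- ===== VERDICT (by name: the statement is the Claim_ definition above) =====
theorem parse_wildcard_pattern_py_spec : Claim_equal_parse_wildcard_pattern_py := by
  intro pattern _
  unfold Spec_parse_wildcard_pattern_py parse_wildcard_pattern_py parse_wildcard_pattern_py_alt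
  have hs : "*".toList = ['*'] := rfl
  rw [hs, splitOn_star_eq, pvA_loop_eq]
  cases h : pvSplit1 pattern.toList with
  | nil => exact absurd h (pvSplit1_ne_nil _)
  | cons h0 t0 => simp [List.headI, List.tail]
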